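-- pv_equiv track=rewrite | github.com/Palinalearn/Python_for_DQE | Functions.py | collect_all_sentences
-- ===== SOURCE A (Python) =====
-- def collect_all_sentences(word_list):
--     # collect all sentence into one text
--     sentence_list = []
--     final_list = []
--     new_line_delimeter = ' '
--     for item in word_list:
--         if not item.endswith('.'):
--             # each word except word with point add into list
--             sentence_list.append(item)
--         else:
--             # then add word with point
--             sentence_list.append(item)
--             # create sentence
--             sentence = new_line_delimeter.join(sentence_list).capitalize()
--             #  add sentence into the new list
--             final_list.append(sentence)
--             # clear sentence list
--             sentence_list = []
--     return final_list
-- ===== SOURCE B (Python) =====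
-- def collect_all_sentences(word_list):
--     # Split-and-slice decomposition: repeatedly find the first word ending
--     # with '.', emit that slice as a capitalized sentence, and continue on
--     # the remainder; trailing words with no period are never emitted.
--     result = []
--     rest = word_list
--     while True:
--         k = next((i for i, w in enumerate(rest) if w.endswith('.')), None)
--         if k is None:
--             return result
--         result.append(' '.join(rest[:k + 1]).capitalize())
--         rest = rest[k + 1:]
-- ===== Notes on version B (the rewrite author's own statement) =====
-- stated objective: alternative
-- what changed: Replaces A's single fold that accumulates words in a buffer and flushes it at each period with a split-and-slice loop that finds the first word ending in '.' and slices that segment off the remainder.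
import Mathlib
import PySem

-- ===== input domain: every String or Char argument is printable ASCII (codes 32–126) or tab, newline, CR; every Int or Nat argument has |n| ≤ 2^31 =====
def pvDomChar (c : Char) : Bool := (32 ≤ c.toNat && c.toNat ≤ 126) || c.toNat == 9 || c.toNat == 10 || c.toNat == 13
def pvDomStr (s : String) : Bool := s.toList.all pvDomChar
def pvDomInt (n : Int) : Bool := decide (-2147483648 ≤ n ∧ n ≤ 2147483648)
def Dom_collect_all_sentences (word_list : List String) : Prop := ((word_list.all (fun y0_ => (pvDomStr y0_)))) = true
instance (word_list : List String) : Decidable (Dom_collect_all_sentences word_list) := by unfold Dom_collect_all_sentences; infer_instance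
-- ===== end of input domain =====

-- B replaces A's buffer-accumulating fold by a split-and-slice decomposition
-- (find the first word ending in '.', slice off that sentence, recurse); same
-- values, same O(n) cost (objective: alternative).

-- str.capitalize(): first char uppercased, the rest lowered (exact on ASCII);
-- PySem has no capitalize, so it is ported by hand here and shared by both ports.
def pyCapitalize (s : String) : String :=
  match s.toList with
  | [] => s
  | c :: cs => String.ofList (PySem.Chars.upperChar c :: PySem.Chars.lower cs)

-- ===== PORT A =====
def collect_all_sentences (word_list : List String) : List String :=
  (word_list.foldl
    (fun (st : List String × List String) (item : String) =>
      if !(PySem.Str.endswith item ".") then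
        (st.1 ++ [item], st.2)
      else
        ([], st.2 ++ [pyCapitalize (PySem.Str.join " " (st.1 ++ [item]))]))
    ([], [])).2

-- ===== PORT B =====
-- Source B's `next((i for i,w in enumerate(rest) if w.endswith('.')), None)` with the
-- slices rest[:k+1] / rest[k+1:] is exactly takeWhile/dropWhile at the first word
-- ending with '.'; the while loop becomes recursion on the remainder.
def collect_all_sentences_alt (word_list : List String) : List String :=
  match h : word_list.dropWhile (fun w => !(PySem.Str.endswith w ".")) with
  | [] => []
  | w :: rest =>
    pyCapitalize (PySem.Str.join " "
        (word_list.takeWhile (fun w => !(PySem.Str.endswith w ".")) ++ [w]))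
      :: collect_all_sentences_alt rest
termination_by word_list.length
decreasing_by
  have hle := List.length_dropWhile_le (p := fun w => !(PySem.Str.endswith w ".")) (l := word_list)
  rw [h] at hle
  simp at hle
  omega

-- ===== PRECONDITION & SPEC =====
def Spec_collect_all_sentences (word_list : List String) (out : List String) : Prop := out = collect_all_sentences_alt word_list
instance (word_list : List String) (out : List String) : Decidable (Spec_collect_all_sentences word_list out) := by unfold Spec_collect_all_sentences; infer_instance

-- ===== CLAIM (what is proved, stated in full; the proofs are below) =====
def Claim_equal_collect_all_sentences : Prop := ∀ (word_list : List String), Dom_collect_all_sentences word_list → Spec_collect_all_sentences word_list (collect_all_sentences word_list)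

-- ===== LEMMAS AND PROOFS =====

-- The body of collect_all_sentences_alt with an explicit pending prefix `buf`.
def segG (buf : List String) (ws : List String) : List String :=
  match ws.dropWhile (fun w => !(PySem.Str.endswith w ".")) with
  | [] => []
  | w :: rest =>
    pyCapitalize (PySem.Str.join " "
        (buf ++ ws.takeWhile (fun w => !(PySem.Str.endswith w ".")) ++ [w]))
      :: collect_all_sentences_alt rest

lemma alt_eq_segG (ws : List String) : collect_all_sentences_alt ws = segG [] ws := by
  rw [collect_all_sentences_alt]
  unfold segG
  cases h : ws.dropWhile (fun w => !(PySem.Str.endswith w ".")) <;> simp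

lemma foldl_eq_segG (ws : List String) : ∀ buf acc,
    (ws.foldl
      (fun (st : List String × List String) (item : String) =>
        if !(PySem.Str.endswith item ".") then
          (st.1 ++ [item], st.2)
        else
          ([], st.2 ++ [pyCapitalize (PySem.Str.join " " (st.1 ++ [item]))]))
      (buf, acc)).2 = acc ++ segG buf ws := by
  induction ws with
  | nil => intro buf acc; simp [segG]
  | cons w t ih =>
    intro buf acc
    by_cases hp : (!(PySem.Str.endswith w ".")) = true
    · simp only [List.foldl_cons, hp, if_pos, ih]
      unfold segG
      simp only [List.dropWhile_cons, List.takeWhile_cons, hp, if_pos]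
      cases h : t.dropWhile (fun w => !(PySem.Str.endswith w ".")) <;>
        simp [List.append_assoc]
    · simp only [Bool.not_eq_true] at hp
      simp only [List.foldl_cons, hp, Bool.false_eq_true, if_false, ih]
      unfold segG
      simp only [List.dropWhile_cons, List.takeWhile_cons, hp, Bool.false_eq_true,
        if_false]
      rw [alt_eq_segG]
      unfold segG
      simp

-- ===== VERDICT (by name: the statement is the Claim_ definition above) =====
theorem collect_all_sentences_spec : Claim_equal_collect_all_sentences := by
  intro ws _
  unfold Spec_collect_all_sentences collect_all_sentences
  rw [foldl_eq_segG, alt_eq_segG]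
  simp
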